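-- pv_equiv track=rewrite | github.com/sejalnamdev/HackWithInfyLNCT-26 | GreedyProblem02.py | minMaxCandy
-- ===== SOURCE A (Python) =====
-- def minMaxCandy(prices, k):
--     # code here
--
--     prices.sort()
--
--     #Maxprice
--     maxi=0;
--     buy=len(prices)-1
--     free=0
--
--     while free<=buy :
--         maxi=maxi+ prices[buy]
--         buy-=1
--         free+=k
--
--
--     #Minprice
--     mini=0
--     buy=0
--     free=len(prices)-1
--
--     while buy<=free :
--         mini=mini+prices[buy]
--         buy+=1
--         free-=k
--
--
--     return [mini,maxi]
-- ===== SOURCE B (Python) =====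
-- def minMaxCandy(prices, k):
--     # closed-form paid count instead of two-pointer loops; keeps the in-place sort
--     prices.sort()
--     n = len(prices)
--     if n == 0:
--         return [0, 0]
--     m = (n - 1) // (k + 1) + 1          # number of candies actually paid for
--     return [sum(prices[:m]), sum(prices[n - m:])]
-- ===== Notes on version B (the rewrite author's own statement) =====
-- stated objective: simpler
-- what changed: Replaces both two-pointer while loops with a closed-form paid count m = (n-1)//(k+1)+1 and two slice sums (m cheapest / m most expensive) over the sorted list.
import Mathlib
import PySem

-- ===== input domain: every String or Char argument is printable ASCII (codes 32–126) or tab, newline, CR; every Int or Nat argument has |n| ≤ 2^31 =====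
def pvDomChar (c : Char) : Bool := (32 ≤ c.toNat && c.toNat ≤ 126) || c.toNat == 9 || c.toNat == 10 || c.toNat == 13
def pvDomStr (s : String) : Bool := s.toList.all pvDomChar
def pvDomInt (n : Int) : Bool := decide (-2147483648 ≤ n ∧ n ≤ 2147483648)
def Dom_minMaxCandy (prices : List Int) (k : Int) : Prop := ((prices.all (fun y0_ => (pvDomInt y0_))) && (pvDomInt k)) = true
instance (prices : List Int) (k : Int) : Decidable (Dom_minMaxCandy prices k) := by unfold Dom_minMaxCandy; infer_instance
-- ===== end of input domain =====

-- B replaces A's two two-pointer while loops by a closed-form paid count and two slice sums (simpler).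
-- A sorts `prices` in place; the equivalence proved here is about the return value (both ports sort a copy).

-- ===== PORT A =====
-- the Maxprice while loop: state (maxi, buy, free); fuel only makes the recursion total
def maxLoopA (s : List Int) (k : Int) : Nat → Int → Int → Int → Int
  | 0, maxi, _, _ => maxi
  | fuel + 1, maxi, buy, free =>
    if free ≤ buy then maxLoopA s k fuel (maxi + PySem.List.pyGetD s buy 0) (buy - 1) (free + k)
    else maxi

-- the Minprice while loop: state (mini, buy, free)
def minLoopA (s : List Int) (k : Int) : Nat → Int → Int → Int → Int
  | 0, mini, _, _ => mini
  | fuel + 1, mini, buy, free =>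
    if buy ≤ free then minLoopA s k fuel (mini + PySem.List.pyGetD s buy 0) (buy + 1) (free - k)
    else mini

def minMaxCandy (prices : List Int) (k : Int) : List Int :=
  let s := PySem.List.sorted prices (fun x => x) false
  let n : Int := s.length
  let maxi := maxLoopA s k (s.length + 1) 0 (n - 1) 0
  let mini := minLoopA s k (s.length + 1) 0 0 (n - 1)
  [mini, maxi]

-- ===== PORT B =====
def minMaxCandy_alt (prices : List Int) (k : Int) : List Int :=
  let s := PySem.List.sorted prices (fun x => x) false
  let n : Int := s.length
  if n = 0 then [0, 0]
  else
    let m := PySem.Int.floordiv (n - 1) (k + 1) + 1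
    [(PySem.List.slice s none (some m)).sum, (PySem.List.slice s (some (n - m)) none).sum]

-- ===== PRECONDITION & SPEC =====
-- Pre_ excludes k < 0 with a nonempty list: there A's loops walk the index below -len(prices) and raise IndexError.
def Pre_minMaxCandy (prices : List Int) (k : Int) : Prop := prices = [] ∨ 0 ≤ k
instance (prices : List Int) (k : Int) : Decidable (Pre_minMaxCandy prices k) := by unfold Pre_minMaxCandy; infer_instance

def pvWitness_minMaxCandy : List Int × Int := ([3, 1, 2, 5], 1)

def Spec_minMaxCandy (prices : List Int) (k : Int) (out : List Int) : Prop := out = minMaxCandy_alt prices k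
instance (prices : List Int) (k : Int) (out : List Int) : Decidable (Spec_minMaxCandy prices k out) := by unfold Spec_minMaxCandy; infer_instance

-- ===== CLAIM (what is proved, stated in full; the proofs are below) =====
def Claim_equal_minMaxCandy : Prop := ∀ (prices : List Int) (k : Int), Dom_minMaxCandy prices k → Pre_minMaxCandy prices k → Spec_minMaxCandy prices k (minMaxCandy prices k)

-- ===== LEMMAS AND PROOFS =====

-- min loop sums the first m elements of the sorted list
theorem minLoopA_sum (s : List Int) (k : Int) (m : Nat)
    (hm : ∀ i : Nat, (i : Int) < m ↔ (i : Int) * (k + 1) ≤ (s.length : Int) - 1)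
    (hms : m ≤ s.length) :
    ∀ (fuel : Nat) (i : Nat) (acc : Int), i ≤ m → m - i ≤ fuel →
      minLoopA s k fuel acc i (((s.length : Int) - 1) - i * k) = acc + ((s.take m).drop i).sum := by
  intro fuel
  induction fuel with
  | zero =>
    intro i acc him hfu
    have : i = m := by omega
    subst this
    simp [minLoopA]
  | succ fuel ih =>
    intro i acc him hfu
    by_cases hil : i < m
    · have hcond : (i : Int) ≤ ((s.length : Int) - 1) - i * k := by
        have := (hm i).mp (by exact_mod_cast hil)
        nlinarith
      have hin : i < s.length := by omega
      have hget : PySem.List.pyGetD s (i : Int) 0 = s[i] := by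
        rw [PySem.List.pyGetD_natCast]
        exact List.getD_eq_getElem s 0 hin
      have hstep : (((s.length : Int) - 1) - i * k) - k = ((s.length : Int) - 1) - (↑(i + 1)) * k := by
        push_cast; ring
      have := ih (i + 1) (acc + s[i]) (by omega) (by omega)
      rw [minLoopA, if_pos hcond, hget]
      have harg : ((i : Int) + 1) = ((i + 1 : Nat) : Int) := by push_cast; ring
      rw [harg, hstep, this]
      have hdrop : (s.take m).drop i = s[i] :: (s.take m).drop (i + 1) := by
        have hlen : i < (s.take m).length := by simp; omega
        rw [List.drop_eq_getElem_cons hlen]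
        congr 1
        exact List.getElem_take
      rw [hdrop]
      simp [List.sum_cons]
      ring
    · have hieq : i = m := by omega
      have hcond : ¬ ((i : Int) ≤ ((s.length : Int) - 1) - i * k) := by
        intro h
        have h2 := (hm i).mpr (by nlinarith)
        omega
      rw [minLoopA, if_neg hcond, hieq]
      simp

-- max loop sums the last m elements of the sorted list
theorem maxLoopA_sum (s : List Int) (k : Int) (m : Nat)
    (hm : ∀ i : Nat, (i : Int) < m ↔ (i : Int) * (k + 1) ≤ (s.length : Int) - 1)
    (hms : m ≤ s.length) :
    ∀ (fuel : Nat) (i : Nat) (acc : Int), i ≤ m → m - i ≤ fuel →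
      maxLoopA s k fuel acc ((s.length : Int) - 1 - i) (i * k) = acc + ((s.drop (s.length - m)).take (m - i)).sum := by
  intro fuel
  induction fuel with
  | zero =>
    intro i acc him hfu
    have : i = m := by omega
    subst this
    simp [maxLoopA]
  | succ fuel ih =>
    intro i acc him hfu
    by_cases hil : i < m
    · have hcond : (i : Int) * k ≤ (s.length : Int) - 1 - i := by
        have := (hm i).mp (by exact_mod_cast hil)
        nlinarith
      have hidx : ((s.length : Int) - 1 - i) = ((s.length - 1 - i : Nat) : Int) := by
        have : i < s.length := by omega
        omega
      have hin : s.length - 1 - i < s.length := by omega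
      have hget : PySem.List.pyGetD s ((s.length : Int) - 1 - i) 0 = s[s.length - 1 - i] := by
        rw [hidx, PySem.List.pyGetD_natCast]
        exact List.getD_eq_getElem s 0 hin
      have := ih (i + 1) (acc + s[s.length - 1 - i]) (by omega) (by omega)
      rw [maxLoopA, if_pos hcond, hget]
      have harg1 : ((s.length : Int) - 1 - i) - 1 = (s.length : Int) - 1 - (↑(i + 1)) := by push_cast; ring
      have harg2 : (i : Int) * k + k = (↑(i + 1)) * k := by push_cast; ring
      rw [harg1, harg2, this]
      -- sum bookkeeping: take (m - i) = take (m - (i+1)) ++ [d[m-1-i]] where d = s.drop (s.length - m)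
      set d := s.drop (s.length - m) with hd
      have hdlen : d.length = m := by simp [hd]; omega
      have hsub : m - i = (m - (i + 1)) + 1 := by omega
      have hjlt : m - (i + 1) < d.length := by omega
      have htake : d.take (m - i) = d.take (m - (i + 1)) ++ [d[m - (i + 1)]] := by
        rw [hsub, List.take_add_one]
        simp [List.getElem?_eq_getElem hjlt]
      have hdval : d[m - (i + 1)]'hjlt = s[s.length - 1 - i]'hin := by
        simp only [hd, List.getElem_drop]
        congr 1
        omega
      rw [htake, List.sum_append]
      simp [hdval]
      ring
    · have hieq : i = m := by omega
      have hcond : ¬ ((i : Int) * k ≤ (s.length : Int) - 1 - (i : Int)) := by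
        intro h
        have h2 := (hm i).mpr (by nlinarith)
        omega
      rw [maxLoopA, if_neg hcond]
      simp [hieq]

-- the paid count m = (n-1)//(k+1)+1 satisfies the loop-exit bracket and the bounds 1 ≤ m ≤ n
theorem m_bracket (n k : Int) (hk : 0 ≤ k) (hn : 1 ≤ n) :
    (0 : Int) < PySem.Int.floordiv (n - 1) (k + 1) + 1 ∧
    PySem.Int.floordiv (n - 1) (k + 1) + 1 ≤ n ∧
    (∀ i : Int, i < PySem.Int.floordiv (n - 1) (k + 1) + 1 ↔ i * (k + 1) ≤ n - 1) := by
  have hb : (0 : Int) < k + 1 := by omega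
  have hbr : ∀ i : Int, i ≤ PySem.Int.floordiv (n - 1) (k + 1) ↔ i * (k + 1) ≤ n - 1 := by
    intro i; exact PySem.Int.le_floordiv_iff_mul_le hb
  refine ⟨by have := (hbr 0).mpr (by omega); omega, ?_, ?_⟩
  · have := (hbr (PySem.Int.floordiv (n - 1) (k + 1))).mp le_rfl
    nlinarith
  · intro i
    rw [show (i < PySem.Int.floordiv (n - 1) (k + 1) + 1) ↔ (i ≤ PySem.Int.floordiv (n - 1) (k + 1)) by omega]
    exact hbr i

theorem minMaxCandy_eq (prices : List Int) (k : Int) (hpre : Pre_minMaxCandy prices k) :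
    minMaxCandy prices k = minMaxCandy_alt prices k := by
  rcases hpre with hnil | hk
  · subst hnil
    rfl
  · set s := PySem.List.sorted prices (fun x => x) false with hs
    by_cases hempty : s = []
    · simp [minMaxCandy, minMaxCandy_alt, ← hs, hempty, maxLoopA, minLoopA]
    · have hn1 : 1 ≤ (s.length : Int) := by
        have : s.length ≠ 0 := by simpa [List.length_eq_zero_iff] using hempty
        omega
      obtain ⟨hm0, hmn, hbr⟩ := m_bracket (s.length) k hk hn1
      set mi : Int := PySem.Int.floordiv ((s.length : Int) - 1) (k + 1) + 1 with hmi
      set m : Nat := mi.toNat with hmdef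
      have hmcast : (m : Int) = mi := by omega
      have hms : m ≤ s.length := by omega
      have hmNat : ∀ i : Nat, (i : Int) < m ↔ (i : Int) * (k + 1) ≤ (s.length : Int) - 1 := by
        intro i; rw [hmcast]; exact hbr i
      have hminv := minLoopA_sum s k m hmNat hms (s.length + 1) 0 0 (by omega) (by omega)
      have hmaxv := maxLoopA_sum s k m hmNat hms (s.length + 1) 0 0 (by omega) (by omega)
      norm_num at hminv hmaxv
      have htakeall : (s.drop (s.length - m)).take m = s.drop (s.length - m) := by
        apply List.take_of_length_le
        simp
        omega
      rw [htakeall] at hmaxv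
      simp only [minMaxCandy, minMaxCandy_alt, ← hs, ← hmi]
      rw [hminv, hmaxv, if_neg (by omega : ¬ ((s.length : Int) = 0))]
      rw [PySem.List.slice_to s (by omega : (0:Int) ≤ mi),
          PySem.List.slice_from s (by omega : (0:Int) ≤ (s.length : Int) - mi)]
      rw [show mi.toNat = m from rfl,
          show ((s.length : Int) - mi).toNat = s.length - m by omega]

-- ===== VERDICT (by name: the statement is the Claim_ definition above) =====
theorem minMaxCandy_spec : Claim_equal_minMaxCandy := by
  intro prices k _ hpre
  unfold Spec_minMaxCandy
  exact minMaxCandy_eq prices k hpre
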